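-- pv_equiv track=rewrite | github.com/bschultz99/SkullBot | main.py | takedown_availability
-- ===== SOURCE A (Python) =====
-- def takedown_availability(input):
--     takedowns = [False] * 10
--     takedowns_index = {
--         'ML': 0,
--         'MD': 1,
--         'TL': 2,
--         'TD': 3,
--         'WL': 4,
--         'WD': 5,
--         'HL': 6,
--         'HD': 7,
--         'FL': 8,
--         'FD': 9
--     }
--     for takedown in input:
--         day = takedown['value']
--         takedowns[takedowns_index[day]] = True
--     return takedowns
-- ===== SOURCE B (Python) =====
-- def takedown_availability(input):
--     codes = ['ML', 'MD', 'TL', 'TD', 'WL', 'WD', 'HL', 'HD', 'FL', 'FD']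
--     return [any(t['value'] == code for t in input) for code in codes]
-- ===== Notes on version B (the rewrite author's own statement) =====
-- stated objective: alternative
-- what changed: Transposes the loops and drops the index dict entirely: instead of marking a preallocated boolean list per input entry via a value-to-index dict, B builds each output position directly by scanning the input for that position's code (output-driven nested scan).
import Mathlib
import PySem

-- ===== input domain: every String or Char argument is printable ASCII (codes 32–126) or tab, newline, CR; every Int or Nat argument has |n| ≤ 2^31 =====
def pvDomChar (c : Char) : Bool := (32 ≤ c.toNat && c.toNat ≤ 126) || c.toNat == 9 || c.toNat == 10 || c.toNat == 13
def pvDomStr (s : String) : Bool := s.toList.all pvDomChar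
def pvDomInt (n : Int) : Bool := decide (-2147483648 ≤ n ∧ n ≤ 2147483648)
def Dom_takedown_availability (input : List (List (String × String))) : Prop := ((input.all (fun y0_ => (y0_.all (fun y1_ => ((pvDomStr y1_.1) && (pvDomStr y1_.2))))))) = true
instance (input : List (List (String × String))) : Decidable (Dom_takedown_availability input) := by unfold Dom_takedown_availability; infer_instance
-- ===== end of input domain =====

-- B drops A's value-to-index dict and its write-into-a-preallocated-list loop: it builds each
-- output position directly by scanning the input for that position's code (transposed loops).

-- ===== PORT A =====
def tdIndexA : PySem.Dict String Int :=
  PySem.Dict.ofList [("ML",0),("MD",1),("TL",2),("TD",3),("WL",4),("WD",5),("HL",6),("HD",7),("FL",8),("FD",9)]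

def takedown_availability (input : List (List (String × String))) : List Bool :=
  input.foldl
    (fun takedowns takedown =>
      let day := ((PySem.Dict.mk takedown).get? "value").getD ""
      PySem.List.pySetD takedowns ((tdIndexA.get? day).getD 0) true)
    (List.replicate 10 false)

-- ===== PORT B =====
def tdVal (t : List (String × String)) : String := (((PySem.Dict.mk t).get? "value").getD "")

def tdCodes : List String := ["ML","MD","TL","TD","WL","WD","HL","HD","FL","FD"]

def takedown_availability_alt (input : List (List (String × String))) : List Bool :=
  tdCodes.map (fun code => input.any (fun t => tdVal t == code))

-- ===== PRECONDITION & SPEC =====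
-- Pre_ excludes exactly the inputs on which A raises KeyError: an entry without a
-- 'value' key, or whose 'value' is not one of the ten takedown codes.
def Pre_takedown_availability (input : List (List (String × String))) : Prop :=
  ∀ t ∈ input, tdVal t ∈ tdCodes
instance (input : List (List (String × String))) : Decidable (Pre_takedown_availability input) := by
  unfold Pre_takedown_availability; infer_instance

def pvWitness_takedown_availability : (List (List (String × String))) := [[("value","ML")], [("value","FD")]]

def Spec_takedown_availability (input : List (List (String × String))) (out : List Bool) : Prop := out = takedown_availability_alt input
instance (input : List (List (String × String))) (out : List Bool) : Decidable (Spec_takedown_availability input out) := by unfold Spec_takedown_availability; infer_instance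

-- ===== CLAIM (what is proved, stated in full; the proofs are below) =====
def Claim_equal_takedown_availability : Prop := ∀ (input : List (List (String × String))), Dom_takedown_availability input → Pre_takedown_availability input → Spec_takedown_availability input (takedown_availability input)

-- ===== LEMMAS AND PROOFS =====
def tdIdx (d : String) : Int := (tdIndexA.get? d).getD 0
def tdSeenIdx (t : List (String × String)) : Int := tdIdx (tdVal t)

lemma td_idx_bound : ∀ d ∈ tdCodes, 0 ≤ tdIdx d ∧ tdIdx d < 10 := by decide

lemma td_beq_iff_idx : ∀ a ∈ tdCodes, ∀ b ∈ tdCodes, (a == b) = (tdIdx a == tdIdx b) := by decide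

lemma td_fold_set_eq (js : List Int) :
    ∀ (acc : List Bool), acc.length = 10 → (∀ j ∈ js, 0 ≤ j ∧ j < 10) →
    js.foldl (fun td j => PySem.List.pySetD td j true) acc
      = (PySem.List.pyRange 0 10 1).map (fun i => PySem.List.pyGetD acc i false || js.contains i) := by
  induction js with
  | nil =>
      intro acc hlen _
      simp only [List.foldl_nil, List.contains_nil, Bool.or_false]
      rw [show ((10:Int) = (acc.length:Int)) by omega]
      exact (PySem.List.map_pyGetD_pyRange_zero' acc false).symm
  | cons j rest ih =>
      intro acc hlen hb
      have hj := hb j (by simp)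
      rw [List.foldl_cons,
          ih (PySem.List.pySetD acc j true)
            (by rw [PySem.List.length_pySetD]; exact hlen)
            (fun x hx => hb x (by simp [hx]))]
      refine List.map_congr_left (fun i hi => ?_)
      rw [PySem.List.mem_pyRange_one] at hi
      rw [PySem.List.pySetD_of_nonneg acc true hj.1]
      rw [PySem.List.pyGetD_eq_getElem _ false hi.1 (by simp [hlen]; omega)]
      rw [PySem.List.pyGetD_eq_getElem _ false hi.1 (by simp [hlen]; omega)]
      rw [List.getElem_set, List.contains_cons]
      by_cases hij : i = j
      · have : j.toNat = i.toNat := by omega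
        simp [hij, this]
      · have h1 : ¬ j.toNat = i.toNat := by omega
        have h2 : (i == j) = false := by simp [hij]
        simp [h1, h2]

lemma td_A_eq_fold_map (input : List (List (String × String))) :
    takedown_availability input
      = (input.map tdSeenIdx).foldl (fun td j => PySem.List.pySetD td j true)
          (List.replicate 10 false) := by
  rw [takedown_availability, List.foldl_map]
  rfl

lemma td_any_eq_contains (input : List (List (String × String)))
    (h : ∀ t ∈ input, tdVal t ∈ tdCodes) (d : String) (hd : d ∈ tdCodes) :
    (input.any (fun t => tdVal t == d)) = (input.map tdSeenIdx).contains (tdIdx d) := by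
  induction input with
  | nil => simp
  | cons t rest ih =>
      have ht := h t (by simp)
      rw [List.any_cons, List.map_cons, List.contains_cons,
          ih (fun x hx => h x (by simp [hx]))]
      rw [td_beq_iff_idx (tdVal t) ht d hd, tdSeenIdx]
      have : (tdIdx (tdVal t) == tdIdx d) = (tdIdx d == tdIdx (tdVal t)) := by
        by_cases h' : tdIdx (tdVal t) = tdIdx d <;> simp [h', Ne.symm, eq_comm]
      rw [this]

-- ===== VERDICT (by name: the statement is the Claim_ definition above) =====
theorem takedown_availability_spec : Claim_equal_takedown_availability := by
  intro input _ hpre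
  unfold Spec_takedown_availability
  have hb : ∀ j ∈ input.map tdSeenIdx, 0 ≤ j ∧ j < 10 := by
    intro j hj
    rcases List.mem_map.1 hj with ⟨t, ht, rfl⟩
    exact td_idx_bound _ (hpre t ht)
  rw [td_A_eq_fold_map,
      td_fold_set_eq (input.map tdSeenIdx) (List.replicate 10 false) (by simp) hb,
      takedown_availability_alt]
  have hrange : PySem.List.pyRange 0 10 1 = tdCodes.map tdIdx := by decide
  rw [hrange, List.map_map]
  refine (List.map_congr_left (fun d hd => ?_)).symm
  rw [td_any_eq_contains input hpre d hd]
  have hget : PySem.List.pyGetD (List.replicate 10 false) (tdIdx d) false = false := by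
    have hb' := td_idx_bound d hd
    rw [PySem.List.pyGetD_eq_getElem _ false hb'.1 (by simp; omega), List.getElem_replicate]
  simp only [Function.comp]
  rw [hget, Bool.false_or]
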